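-- pv_equiv track=rewrite | github.com/kumar-gautam24/codes | python3/minimalstring.py | minimalString
-- ===== SOURCE A (Python) =====
-- def minimalString(s):
--     p=set(s)
--     x="abcedfghijklmnopqrstuvwxyz"
--     for i in x:
--         if i not in p:
--             return i
--     c=2
--     while True:
--         from itertools import product
--         for i in product(x,repeat=c):
--             y="".join(i)
--             if y not in p:
--                 return y
--
--         c+=1
-- ===== SOURCE B (Python) =====
-- def minimalString(s):
--     x = "abcedfghijklmnopqrstuvwxyz"
--     missing = set(x) - set(s)
--     if not missing:
--         return "aa"
--     return min(missing, key=x.find)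
-- ===== Notes on version B (the rewrite author's own statement) =====
-- stated objective: simpler
-- what changed: Replaces the first-hit scan over the alphabet and the unbounded itertools.product fallback loop with a set difference whose minimum is picked by alphabet position, and a direct constant two-letter fallback (the product search always returns its first candidate, since set(s) holds only single characters).
import Mathlib
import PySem

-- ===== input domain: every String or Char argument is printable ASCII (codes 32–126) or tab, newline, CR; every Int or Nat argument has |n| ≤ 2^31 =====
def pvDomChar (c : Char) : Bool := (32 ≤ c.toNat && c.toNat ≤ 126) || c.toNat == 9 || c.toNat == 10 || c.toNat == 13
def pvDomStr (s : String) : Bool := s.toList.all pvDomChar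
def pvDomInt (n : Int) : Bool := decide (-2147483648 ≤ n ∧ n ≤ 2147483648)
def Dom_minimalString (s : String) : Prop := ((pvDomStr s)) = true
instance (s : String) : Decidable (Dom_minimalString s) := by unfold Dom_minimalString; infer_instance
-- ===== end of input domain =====

-- B replaces A's first-hit alphabet scan and unbounded product fallback loop by a set difference
-- whose minimum is picked by alphabet position, with a direct constant "aa" fallback (simpler).

-- ===== PORT A =====
-- the (typo'd) alphabet string x of the Python, as its character list
def pyAlpha : List Char := "abcedfghijklmnopqrstuvwxyz".toList

def minimalString (s : String) : String :=
  -- p = set(s): Python iterates the string, so p holds s's characters as one-character strings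
  let p : PySem.Set String := PySem.Set.ofList (s.toList.map (fun c => String.ofList [c]))
  -- for i in x: if i not in p: return i
  match pyAlpha.find? (fun c => !(PySem.Set.contains p (String.ofList [c]))) with
  | some c => String.ofList [c]
  | none =>
    -- c = 2 pass: for i in product(x, repeat=2): y = "".join(i); if y not in p: return y
    -- (every element of p is a one-character string, so this pass always returns;
    --  the 'while True' / 'c += 1' continuation is unreachable and ported as the "" default)
    let pairs : List (Char × Char) := pyAlpha.flatMap (fun a => pyAlpha.map (fun b => (a, b)))
    match pairs.find? (fun ab => !(PySem.Set.contains p (String.ofList [ab.1, ab.2]))) with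
    | some ab => String.ofList [ab.1, ab.2]
    | none => ""

-- ===== PORT B =====
def minimalString_alt (s : String) : String :=
  -- missing = set(x) - set(s)
  let missing : PySem.Set String :=
    PySem.Set.diff (PySem.Set.ofList (("abcedfghijklmnopqrstuvwxyz").toList.map (fun c => String.ofList [c])))
      (PySem.Set.ofList (s.toList.map (fun c => String.ofList [c])))
  if missing = [] then "aa"
  -- min(missing, key=x.find); the key is injective on missing, so hash order is irrelevant
  else match PySem.List.min? missing (fun y => PySem.Str.find "abcedfghijklmnopqrstuvwxyz" y) with
       | some m => m
       | none => ""   -- unreachable: missing ≠ []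

-- ===== PRECONDITION & SPEC =====
def Spec_minimalString (s : String) (out : String) : Prop := out = minimalString_alt s
instance (s : String) (out : String) : Decidable (Spec_minimalString s out) := by unfold Spec_minimalString; infer_instance

-- ===== CLAIM (what is proved, stated in full; the proofs are below) =====
def Claim_equal_minimalString : Prop := ∀ (s : String), Dom_minimalString s → Spec_minimalString s (minimalString s)

-- ===== LEMMAS AND PROOFS =====

def alphaStrs : List String := pyAlpha.map (fun c => String.ofList [c])

theorem find?_eq_head?_of_all {α : Type} (p : α → Bool) (l : List α)
    (h : ∀ x ∈ l, p x = true) : l.find? p = l.head? := by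
  cases l with
  | nil => rfl
  | cons a t => simp [List.find?, h a (by simp)]

theorem min?_pairwise_head {α : Type} (key : α → Int) (m : α) (t : List α)
    (hpw : List.Pairwise (fun a b => key a < key b) (m :: t)) :
    PySem.List.min? (m :: t) key = some m := by
  cases hm : PySem.List.min? (m :: t) key with
  | none => simp [PySem.List.min?_eq_none_iff] at hm
  | some m' =>
    have hmem := PySem.List.min?_mem hm
    have hmin := PySem.List.min?_isMin hm m (by simp)
    rcases List.mem_cons.mp hmem with rfl | hmt
    · rfl
    · have := (List.pairwise_cons.mp hpw).1 m' hmt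
      omega

theorem alpha_nodup : PySem.Set.ofList alphaStrs = alphaStrs := by decide

theorem alpha_keys_strict :
    List.Pairwise (fun a b => PySem.Str.find "abcedfghijklmnopqrstuvwxyz" a <
      PySem.Str.find "abcedfghijklmnopqrstuvwxyz" b) alphaStrs := by decide

theorem two_char_not_mem (s : String) (a b : Char) :
    (String.ofList [a, b] ∈ s.toList.map (fun d => String.ofList [d])) = False := by
  simp only [eq_iff_iff, iff_false]
  intro h
  rcases List.mem_map.mp h with ⟨d, _, he⟩
  have := congrArg String.toList he
  simp at this

theorem contains_ofList_map (s : String) (y : String) :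
    PySem.Set.contains (PySem.Set.ofList (s.toList.map (fun c => String.ofList [c]))) y =
      decide (y ∈ s.toList.map (fun c => String.ofList [c])) := by
  have h := PySem.Set.mem_ofList (s.toList.map (fun c => String.ofList [c])) y
  simp only [PySem.Set.contains]
  simp [h]

-- ===== VERDICT (by name: the statement is the Claim_ definition above) =====
theorem minimalString_spec : Claim_equal_minimalString := by
  intro s _
  unfold Spec_minimalString minimalString minimalString_alt
  simp only []
  set pred : Char → Bool :=
    (fun c => !(PySem.Set.contains (PySem.Set.ofList (s.toList.map (fun c => String.ofList [c])))
      (String.ofList [c]))) with hpred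
  have hmiss :
      PySem.Set.diff (PySem.Set.ofList (("abcedfghijklmnopqrstuvwxyz").toList.map (fun c => String.ofList [c])))
        (PySem.Set.ofList (s.toList.map (fun c => String.ofList [c])))
        = (pyAlpha.filter pred).map (fun c => String.ofList [c]) := by
    show PySem.Set.diff (PySem.Set.ofList alphaStrs) _ = _
    rw [alpha_nodup]
    unfold PySem.Set.diff alphaStrs
    rw [List.filter_map]
    rfl
  rw [hmiss, ← List.head?_filter]
  cases hf : pyAlpha.filter pred with
  | nil =>
    -- all 26 letters occur in s; A runs the product pass, B returns "aa"
    simp only [List.head?_nil, List.map_nil]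
    simp only [if_true]
    have hall : ∀ ab ∈ pyAlpha.flatMap (fun a => pyAlpha.map (fun b => (a, b))),
        (fun ab : Char × Char => !(PySem.Set.contains
          (PySem.Set.ofList (s.toList.map (fun c => String.ofList [c])))
          (String.ofList [ab.1, ab.2]))) ab = true := by
      intro ab _
      simp only [contains_ofList_map, two_char_not_mem, Bool.not_eq_true']
      simp
    rw [find?_eq_head?_of_all _ _ hall]
    rfl
  | cons c t =>
    -- first missing letter c; A returns it from the scan, B as the minimum by alphabet position
    simp only [List.head?_cons, List.map_cons]
    rw [if_neg (by simp)]
    have hsub : ((c :: t).map (fun c => String.ofList [c])).Sublist alphaStrs := by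
      rw [← hf]
      exact List.filter_sublist.map _
    have hpw := alpha_keys_strict.sublist hsub
    rw [min?_pairwise_head _ _ _ (by simpa using hpw)]
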